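-- pv_equiv track=rewrite | github.com/lxylxy123456/uberxmhf | bug_059/replace.py | strip_content
-- ===== SOURCE A (Python) =====
-- def strip_content(content):
-- 	'''
-- 	Remove spaces at end of line, remove extra new lines at end of file
-- 	'''
-- 	lines = content.split('\n')
-- 	for index, i in enumerate(lines):
-- 		lines[index] = i.rstrip()
-- 	while lines and lines[-1] == '':
-- 		assert lines.pop() == ''
-- 	lines.append('')
-- 	return '\n'.join(lines)
-- ===== SOURCE B (Python) =====
-- def strip_content(content):
--     '''
--     Remove spaces at end of line, remove extra new lines at end of file
--     '''
--     out = []       # committed characters (never ends in whitespace)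
--     pws = []       # pending intra-line whitespace, dropped at end of line / end of file
--     pnl = 0        # pending newlines, dropped if no further non-blank text follows
--     for c in content:
--         if c == '\n':
--             pws = []
--             pnl += 1
--         elif c.isspace():
--             pws.append(c)
--         else:
--             out.append('\n' * pnl)
--             out.extend(pws)
--             out.append(c)
--             pws = []
--             pnl = 0
--     return ''.join(out) + '\n' if out else ''
-- ===== Notes on version B (the rewrite author's own statement) =====
-- stated objective: alternative
-- what changed: Replaced A's split-into-lines / per-line rstrip / while-pop of trailing blank lines / join pipeline by a single left-to-right character scan that keeps committed output plus buffers of pending whitespace and pending newlines, committing the buffers only when further non-blank text arrives.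
import Mathlib
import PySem

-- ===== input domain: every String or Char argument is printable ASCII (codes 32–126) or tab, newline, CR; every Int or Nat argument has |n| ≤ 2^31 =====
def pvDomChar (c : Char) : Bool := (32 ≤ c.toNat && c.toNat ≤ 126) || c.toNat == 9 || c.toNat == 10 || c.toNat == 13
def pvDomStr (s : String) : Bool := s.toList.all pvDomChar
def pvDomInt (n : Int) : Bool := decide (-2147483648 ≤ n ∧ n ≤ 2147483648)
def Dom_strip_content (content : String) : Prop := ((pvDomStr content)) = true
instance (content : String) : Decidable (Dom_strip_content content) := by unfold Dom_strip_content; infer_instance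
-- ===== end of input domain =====

-- B replaces A's split / per-line-rstrip / trailing-pop / join pipeline with a single
-- left-to-right character scan that buffers pending whitespace and newlines and only
-- commits them when further non-blank text arrives (objective: alternative, not faster).

-- ===== PORT A =====
-- `while lines and lines[-1] == '': assert lines.pop() == ''`  (the assert is always true)
def popTrail (ls : List (List Char)) : List (List Char) :=
  if h : ls ≠ [] ∧ ls.getLast? = some [] then popTrail ls.dropLast else ls
termination_by ls.length
decreasing_by
  have h1 := List.length_pos_of_ne_nil h.1
  rw [List.length_dropLast]; omega

def strip_content (content : String) : String :=
  -- lines = content.split('\n'); for index, i in enumerate(lines): lines[index] = i.rstrip()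
  -- while …pop…; lines.append(''); return '\n'.join(lines)
  String.ofList (PySem.Chars.join ['\n']
    (popTrail ((PySem.Chars.splitOn content.toList ['\n']).map PySem.Chars.rstrip) ++ [[]]))

-- ===== PORT B =====
-- one step of B's character loop: state = (out, pws, pnl)
def altStep (s : List Char × List Char × Nat) (c : Char) : List Char × List Char × Nat :=
  if c = '\n' then (s.1, [], s.2.2 + 1)
  else if PySem.Chars.isspace c then (s.1, s.2.1 ++ [c], s.2.2)
  else (s.1 ++ List.replicate s.2.2 '\n' ++ s.2.1 ++ [c], [], 0)

def strip_content_alt (content : String) : String :=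
  let st := content.toList.foldl altStep ([], [], 0)
  if st.1.isEmpty then "" else String.ofList (st.1 ++ ['\n'])

-- ===== PRECONDITION & SPEC =====
def Spec_strip_content (content : String) (out : String) : Prop := out = strip_content_alt content
instance (content : String) (out : String) : Decidable (Spec_strip_content content out) := by unfold Spec_strip_content; infer_instance

-- ===== CLAIM (what is proved, stated in full; the proofs are below) =====
def Claim_equal_strip_content : Prop := ∀ (content : String), Dom_strip_content content → Spec_strip_content content (strip_content content)

-- ===== LEMMAS AND PROOFS =====

-- drop the maximal p-suffix (Python rstrip's shape; also A's trailing-blank-line removal)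
def revDrop {α : Type} (p : α → Bool) (l : List α) : List α := (l.reverse.dropWhile p).reverse

-- reference form of content.split('\n')
def pySplitNl : List Char → List (List Char)
  | [] => [[]]
  | c :: cs => if c = '\n' then [] :: pySplitNl cs else (c :: (pySplitNl cs).headI) :: (pySplitNl cs).tail

-- stripped lines with trailing blank lines removed, and the common core value
def Lf (cs : List Char) : List (List Char) :=
  revDrop (fun l => l.isEmpty) ((pySplitNl cs).map PySem.Chars.rstrip)
def coreF (cs : List Char) : List Char := List.intercalate ['\n'] (Lf cs)

lemma revDrop_cons {α : Type} (p : α → Bool) (a : α) (l : List α) :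
    revDrop p (a :: l) = if revDrop p l = [] then (if p a then [] else [a]) else a :: revDrop p l := by
  unfold revDrop
  rw [List.reverse_cons, List.dropWhile_append]
  by_cases h : List.dropWhile p l.reverse = []
  · by_cases hp : p a = true <;> simp [h, List.dropWhile, hp]
  · simp [h]

lemma revDrop_ne_nil_last {α : Type} (p : α → Bool) (l : List α) (h : revDrop p l ≠ []) :
    ∃ t a, revDrop p l = t ++ [a] ∧ p a = false := by
  unfold revDrop at *
  cases hd : List.dropWhile p l.reverse with
  | nil => simp [hd] at h
  | cons x xs =>
    have hx : p x = false := by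
      have := List.head_dropWhile_not p (l := l.reverse) (by simp [hd])
      simpa [hd] using this
    exact ⟨xs.reverse, x, by simp, hx⟩

lemma pySplitNl_ne_nil (cs : List Char) : pySplitNl cs ≠ [] := by
  cases cs with
  | nil => simp [pySplitNl]
  | cons c cs => simp only [pySplitNl]; split <;> simp

lemma pySplitNl_eq_cons (cs : List Char) :
    pySplitNl cs = (pySplitNl cs).headI :: (pySplitNl cs).tail := by
  cases h : pySplitNl cs with
  | nil => exact absurd h (pySplitNl_ne_nil cs)
  | cons a t => simp

lemma rstrip_cons (c : Char) (l : List Char) :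
    PySem.Chars.rstrip (c :: l) =
      if PySem.Chars.rstrip l = [] then (if PySem.Chars.isspace c then [] else [c])
      else c :: PySem.Chars.rstrip l := by
  have h : PySem.Chars.rstrip = revDrop PySem.Chars.isspace := rfl
  rw [h]; exact revDrop_cons _ _ _

lemma rstrip_nil : PySem.Chars.rstrip [] = [] := rfl

lemma interc_nil (s : List Char) : List.intercalate s [] = [] := by
  simp [List.intercalate]

lemma interc_single (s a : List Char) : List.intercalate s [a] = a := by
  simp [List.intercalate]

lemma interc_cons_cons (s a b : List Char) (l : List (List Char)) :
    List.intercalate s (a :: b :: l) = a ++ s ++ List.intercalate s (b :: l) := by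
  simp [List.intercalate, List.intersperse]

lemma map_split (cs : List Char) :
    (pySplitNl cs).map PySem.Chars.rstrip =
      PySem.Chars.rstrip (pySplitNl cs).headI :: ((pySplitNl cs).tail.map PySem.Chars.rstrip) := by
  conv_lhs => rw [pySplitNl_eq_cons cs]
  rw [List.map_cons]

lemma L_nil_head {cs : List Char} (h : Lf cs = []) :
    PySem.Chars.rstrip (pySplitNl cs).headI = [] := by
  by_contra hne
  unfold Lf at h
  rw [map_split, revDrop_cons] at h
  split_ifs at h <;> simp_all [List.isEmpty_iff]

lemma core_of_L_nil {cs : List Char} (h : Lf cs = []) : coreF cs = [] := by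
  unfold coreF; rw [h, interc_nil]

lemma core_nl (cs : List Char) :
    (Lf ('\n' :: cs) = if Lf cs = [] then [] else [] :: Lf cs) ∧
    (coreF ('\n' :: cs) = if Lf cs = [] then [] else '\n' :: coreF cs) := by
  have hsplit : pySplitNl ('\n' :: cs) = [] :: pySplitNl cs := by simp [pySplitNl]
  have hL : Lf ('\n' :: cs) = if Lf cs = [] then [] else [] :: Lf cs := by
    unfold Lf
    rw [hsplit, List.map_cons, rstrip_nil, revDrop_cons]
    by_cases h : revDrop (fun l => l.isEmpty) ((pySplitNl cs).map PySem.Chars.rstrip) = [] <;>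
      simp [h]
  refine ⟨hL, ?_⟩
  unfold coreF
  rw [hL]
  by_cases h : Lf cs = []
  · simp [h, interc_nil]
  · rw [if_neg h, if_neg h]
    cases hc : Lf cs with
    | nil => exact absurd hc h
    | cons y ys => rw [interc_cons_cons]; simp

lemma core_cons (c : Char) (cs : List Char) (hc : c ≠ '\n')
    (hr : PySem.Chars.rstrip (c :: (pySplitNl cs).headI) =
          c :: PySem.Chars.rstrip (pySplitNl cs).headI) :
    Lf (c :: cs) ≠ [] ∧ coreF (c :: cs) = c :: coreF cs := by
  have hsplit : pySplitNl (c :: cs) = (c :: (pySplitNl cs).headI) :: (pySplitNl cs).tail := by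
    simp [pySplitNl, hc]
  have hmap : (pySplitNl (c :: cs)).map PySem.Chars.rstrip =
      (c :: PySem.Chars.rstrip (pySplitNl cs).headI) ::
        ((pySplitNl cs).tail.map PySem.Chars.rstrip) := by
    rw [hsplit, List.map_cons, hr]
  have hLc : Lf (c :: cs) =
      if revDrop (fun l => l.isEmpty) ((pySplitNl cs).tail.map PySem.Chars.rstrip) = []
      then [c :: PySem.Chars.rstrip (pySplitNl cs).headI]
      else (c :: PySem.Chars.rstrip (pySplitNl cs).headI) ::
            revDrop (fun l => l.isEmpty) ((pySplitNl cs).tail.map PySem.Chars.rstrip) := by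
    unfold Lf
    rw [hmap, revDrop_cons]
    by_cases h : revDrop (fun l => l.isEmpty) ((pySplitNl cs).tail.map PySem.Chars.rstrip) = [] <;>
      simp [h]
  have hLcs : Lf cs =
      if revDrop (fun l => l.isEmpty) ((pySplitNl cs).tail.map PySem.Chars.rstrip) = []
      then (if (PySem.Chars.rstrip (pySplitNl cs).headI).isEmpty then []
            else [PySem.Chars.rstrip (pySplitNl cs).headI])
      else PySem.Chars.rstrip (pySplitNl cs).headI ::
            revDrop (fun l => l.isEmpty) ((pySplitNl cs).tail.map PySem.Chars.rstrip) := by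
    unfold Lf
    rw [map_split, revDrop_cons]
  constructor
  · rw [hLc]; split <;> simp
  · unfold coreF
    rw [hLc, hLcs]
    by_cases hZ : revDrop (fun l => l.isEmpty) ((pySplitNl cs).tail.map PySem.Chars.rstrip) = []
    · rw [if_pos hZ, if_pos hZ, interc_single]
      by_cases he : (PySem.Chars.rstrip (pySplitNl cs).headI).isEmpty
      · have : PySem.Chars.rstrip (pySplitNl cs).headI = [] := by simpa [List.isEmpty_iff] using he
        simp [this, interc_nil]
      · simp [he, interc_single]
    · rw [if_neg hZ, if_neg hZ]
      cases hz : revDrop (fun l => l.isEmpty) ((pySplitNl cs).tail.map PySem.Chars.rstrip) with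
      | nil => exact absurd hz hZ
      | cons z zs => rw [interc_cons_cons, interc_cons_cons]; simp

lemma core_ne {cs : List Char} (h : Lf cs ≠ []) : coreF cs ≠ [] := by
  obtain ⟨t, a, ht, ha⟩ := revDrop_ne_nil_last (fun l => l.isEmpty)
    ((pySplitNl cs).map PySem.Chars.rstrip) (by unfold Lf at h; exact h)
  have hane : a ≠ [] := by simpa [List.isEmpty_iff] using ha
  unfold coreF Lf
  rw [ht]
  cases t with
  | nil => simpa [interc_single] using hane
  | cons b t' =>
    cases ht' : t' ++ [a] with
    | nil => simp at ht'
    | cons y ys =>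
      rw [List.cons_append, ht', interc_cons_cons]
      simp

-- ===== B's loop characterised =====
lemma B_main (cs : List Char) : ∀ (out pws : List Char) (pnl : Nat),
    (List.foldl altStep (out, pws, pnl) cs).1 =
      out ++ (if PySem.Chars.rstrip (pySplitNl cs).headI = []
              then (if Lf cs = [] then [] else List.replicate pnl '\n' ++ coreF cs)
              else List.replicate pnl '\n' ++ pws ++ coreF cs) := by
  induction cs with
  | nil =>
    intro out pws pnl
    have h1 : Lf [] = [] := by decide
    simp [pySplitNl, rstrip_nil, h1]
  | cons c cs ih =>
    intro out pws pnl
    by_cases hc : c = '\n'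
    · subst hc
      rw [List.foldl_cons]
      have hstep : altStep (out, pws, pnl) '\n' = (out, [], pnl + 1) := by simp [altStep]
      rw [hstep, ih]
      obtain ⟨hLf', hcore'⟩ := core_nl cs
      have hsplit : pySplitNl ('\n' :: cs) = [] :: pySplitNl cs := by simp [pySplitNl]
      by_cases hL : Lf cs = []
      · have h0 : PySem.Chars.rstrip (pySplitNl cs).headI = [] := L_nil_head hL
        simp [hL, hLf', h0, hsplit, rstrip_nil]
      · have hrep : List.replicate (pnl + 1) '\n' ++ coreF cs =
            List.replicate pnl '\n' ++ '\n' :: coreF cs := by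
          rw [List.replicate_succ']; simp
        by_cases h0 : PySem.Chars.rstrip (pySplitNl cs).headI = [] <;>
          simp [hL, hLf', hcore', h0, hsplit, rstrip_nil, hrep]
    · have hsplit : pySplitNl (c :: cs) = (c :: (pySplitNl cs).headI) :: (pySplitNl cs).tail := by
        simp [pySplitNl, hc]
      by_cases hsp : PySem.Chars.isspace c = true
      · rw [List.foldl_cons]
        have hstep : altStep (out, pws, pnl) c = (out, pws ++ [c], pnl) := by
          simp [altStep, hc, hsp]
        rw [hstep, ih]
        by_cases hr : PySem.Chars.rstrip (pySplitNl cs).headI = []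
        · -- blank head line: the pending whitespace never matters
          have hr' : PySem.Chars.rstrip (c :: (pySplitNl cs).headI) = [] := by
            rw [rstrip_cons, if_pos hr, if_pos hsp]
          have hmapeq : (pySplitNl (c :: cs)).map PySem.Chars.rstrip =
              (pySplitNl cs).map PySem.Chars.rstrip := by
            rw [hsplit, List.map_cons, hr', map_split, hr]
          have hLeq : Lf (c :: cs) = Lf cs := by unfold Lf; rw [hmapeq]
          have hceq : coreF (c :: cs) = coreF cs := by unfold coreF; rw [hLeq]
          simp [hr, hr', hsplit, hLeq, hceq]
        · have hr' : PySem.Chars.rstrip (c :: (pySplitNl cs).headI) =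
              c :: PySem.Chars.rstrip (pySplitNl cs).headI := by
            rw [rstrip_cons, if_neg hr]
          obtain ⟨hne, hcc⟩ := core_cons c cs hc hr'
          have hgoal : PySem.Chars.rstrip (pySplitNl (c :: cs)).headI ≠ [] := by
            rw [hsplit, List.headI_cons, hr']; simp
          simp [hr, hsplit, hcc, hr']
      · rw [List.foldl_cons]
        have hstep : altStep (out, pws, pnl) c =
            (out ++ List.replicate pnl '\n' ++ pws ++ [c], [], 0) := by
          simp [altStep, hc, hsp]
        rw [hstep, ih]
        have hr' : PySem.Chars.rstrip (c :: (pySplitNl cs).headI) =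
            c :: PySem.Chars.rstrip (pySplitNl cs).headI := by
          rw [rstrip_cons]
          by_cases h : PySem.Chars.rstrip (pySplitNl cs).headI = [] <;> simp [h, hsp]
        obtain ⟨hne, hcc⟩ := core_cons c cs hc hr'
        have hgoal : PySem.Chars.rstrip (pySplitNl (c :: cs)).headI ≠ [] := by
          rw [hsplit, List.headI_cons, hr']; simp
        have hX : (if PySem.Chars.rstrip (pySplitNl cs).headI = []
              then (if Lf cs = [] then [] else List.replicate 0 '\n' ++ coreF cs)
              else List.replicate 0 '\n' ++ ([] : List Char) ++ coreF cs) = coreF cs := by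
          by_cases h1 : PySem.Chars.rstrip (pySplitNl cs).headI = []
          · by_cases h2 : Lf cs = [] <;> simp [h1, h2, core_of_L_nil]
          · simp [h1]
        rw [hX]
        simp [hsplit, hcc, hr']

lemma B_out (cs : List Char) :
    (List.foldl altStep (([], [], 0) : List Char × List Char × Nat) cs).1 = coreF cs := by
  rw [B_main]
  by_cases h1 : PySem.Chars.rstrip (pySplitNl cs).headI = []
  · by_cases h2 : Lf cs = [] <;> simp [h1, h2, core_of_L_nil]
  · simp [h1]

-- ===== A's pipeline characterised =====
lemma go_nl : ∀ (fuel : Nat) (l : List Char), l.length < fuel → ∀ (cur : List Char) (acc : List (List Char)),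
    PySem.Chars.splitOn.go ['\n'] fuel l cur acc =
      acc.reverse ++ (cur.reverse ++ (pySplitNl l).headI) :: (pySplitNl l).tail := by
  intro fuel
  induction fuel with
  | zero => intro l h; omega
  | succ fuel ih =>
    intro l h cur acc
    cases l with
    | nil =>
      rw [PySem.Chars.splitOn.go.eq_def]
      simp [pySplitNl]
    | cons c rest =>
      rw [PySem.Chars.splitOn.go.eq_def]
      by_cases hc : c = '\n'
      · subst hc
        have hpre : List.isPrefixOf ['\n'] ('\n' :: rest) = true := by
          simp [List.isPrefixOf]
        simp only [hpre, if_pos]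
        have hdrop : List.drop (['\n'].length) ('\n' :: rest) = rest := by simp
        rw [hdrop, ih rest (by simpa using h) [] (cur.reverse :: acc)]
        simp [pySplitNl]
        exact (pySplitNl_eq_cons rest).symm
      · have hpre : List.isPrefixOf ['\n'] (c :: rest) = false := by
          simp [List.isPrefixOf]
          exact fun h' => absurd h'.symm hc
        simp only [hpre, Bool.false_eq_true, if_false]
        rw [ih rest (by simpa using h) (c :: cur) acc]
        simp [pySplitNl, hc]

lemma splitOn_eq (cs : List Char) : PySem.Chars.splitOn cs ['\n'] = pySplitNl cs := by
  unfold PySem.Chars.splitOn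
  rw [go_nl (cs.length + 1) cs (by omega) [] []]
  simp
  exact (pySplitNl_eq_cons cs).symm

lemma popTrail_eq : ∀ (ls : List (List Char)), popTrail ls = revDrop (fun l => l.isEmpty) ls := by
  intro ls
  induction ls using popTrail.induct with
  | case1 ls h ih =>
    rw [popTrail, dif_pos h]
    obtain ⟨hne, hlast⟩ := h
    obtain ⟨l', rfl⟩ := List.getLast?_eq_some_iff.mp hlast
    rw [List.dropLast_concat] at ih ⊢
    rw [ih]
    unfold revDrop
    rw [List.reverse_append]
    simp
  | case2 ls h =>
    rw [popTrail, dif_neg h]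
    by_cases hnil : ls = []
    · subst hnil; rfl
    · have hlast : ls.getLast? ≠ some [] := fun hl => h ⟨hnil, hl⟩
      obtain ⟨a, ha⟩ : ∃ a, ls.getLast? = some a := by
        cases hg : ls.getLast? with
        | none =>
          have := List.getLast?_isSome.mpr hnil
          rw [hg] at this; simp at this
        | some a => exact ⟨a, rfl⟩
      have hane : a ≠ [] := fun h' => hlast (h' ▸ ha)
      obtain ⟨l', rfl⟩ := List.getLast?_eq_some_iff.mp ha
      unfold revDrop
      rw [List.reverse_append]
      have hae : a.isEmpty = false := by simpa [List.isEmpty_iff] using hane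
      simp [hae]

lemma join_concat (sep : List Char) : ∀ (t : List (List Char)),
    PySem.Chars.join sep (t ++ [[]]) = if t = [] then [] else PySem.Chars.join sep t ++ sep := by
  have hj : PySem.Chars.join sep = List.intercalate sep := rfl
  intro t
  induction t with
  | nil => rw [hj]; simp [interc_single]
  | cons a t ih =>
    rw [hj] at ih ⊢
    cases t with
    | nil => simp [interc_cons_cons, interc_single]
    | cons b t' =>
      rw [if_neg (by simp)] at ih
      rw [if_neg (by simp)]
      have h1 : (a :: b :: t') ++ [[]] = a :: (b :: (t' ++ [[]])) := by simp
      rw [h1, interc_cons_cons]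
      have h2 : b :: (t' ++ [[]]) = (b :: t') ++ [[]] := by simp
      rw [h2, ih, interc_cons_cons]
      simp

lemma strip_eq (content : String) : strip_content content = strip_content_alt content := by
  have hA : strip_content content =
      String.ofList (PySem.Chars.join ['\n'] (Lf content.toList ++ [[]])) := by
    unfold strip_content
    rw [splitOn_eq, popTrail_eq]
    rfl
  have hB := B_out content.toList
  by_cases hL : Lf content.toList = []
  · have hc : coreF content.toList = [] := core_of_L_nil hL
    rw [hA, hL]
    simp [strip_content_alt, hB, hc]
  · have hcne := core_ne hL
    rw [hA, join_concat, if_neg hL]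
    have hjoin : PySem.Chars.join ['\n'] (Lf content.toList) = coreF content.toList := rfl
    rw [hjoin]
    simp [strip_content_alt, hB, hcne, List.isEmpty_iff]

-- ===== VERDICT (by name: the statement is the Claim_ definition above) =====
theorem strip_content_spec : Claim_equal_strip_content := by
  intro content _
  unfold Spec_strip_content
  exact strip_eq content
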